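-- pv_equiv track=rewrite | github.com/audreyt/ethercalc | src_code/src/ethercalc/utils/formatters.py | normalize_imported_data
-- ===== SOURCE A (Python) =====
-- from typing import Any, Dict, List, Optional, Union, Tuple
--
-- def normalize_imported_data(data: Dict[str, List[List[Any]]]) -> Dict[str, List[List[Any]]]:
--     """Normalize imported data to ensure consistency."""
--     normalized = {}
--
--     for sheet_name, rows in data.items():
--         normalized_rows = []
--         max_cols = 0
--
--         # First pass: find maximum columns
--         for row in rows:
--             max_cols = max(max_cols, len(row))
--
--         # Second pass: normalize rows
--         for row in rows:
--             normalized_row = []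
--             for col_idx in range(max_cols):
--                 if col_idx < len(row):
--                     value = row[col_idx]
--                     # Convert empty strings to None
--                     if value == "":
--                         value = None
--                     normalized_row.append(value)
--                 else:
--                     normalized_row.append(None)
--
--             # Remove trailing None values
--             while normalized_row and normalized_row[-1] is None:
--                 normalized_row.pop()
--
--             if normalized_row or not normalized_rows:  # Keep at least one row
--                 normalized_rows.append(normalized_row)
--
--         normalized[sheet_name] = normalized_rows
--
--     return normalized
-- ===== SOURCE B (Python) =====
-- def _clean(row):
--     """Map '' to None and drop trailing Nones, building back-to-front."""
--     out = []
--     for value in reversed(row):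
--         if value == "":
--             value = None
--         if out or value is not None:
--             out.append(value)
--     out.reverse()
--     return out
--
--
-- def normalize_imported_data(data):
--     """Normalize imported data to ensure consistency."""
--     normalized = {}
--     for sheet_name, rows in data.items():
--         cleaned = [_clean(row) for row in rows]
--         # keep the first row unconditionally, drop later empty rows
--         normalized[sheet_name] = cleaned[:1] + [r for r in cleaned[1:] if r]
--     return normalized
-- ===== Notes on version B (the rewrite author's own statement) =====
-- stated objective: simpler
-- what changed: B drops A's max_cols/padding pass entirely (padding is undone by the trailing-None strip), cleans each row in one back-to-front pass that strips trailing Nones while mapping '' to None, and replaces A's stateful keep-flag with a slice: cleaned[:1] + later non-empty rows.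
import Mathlib
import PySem

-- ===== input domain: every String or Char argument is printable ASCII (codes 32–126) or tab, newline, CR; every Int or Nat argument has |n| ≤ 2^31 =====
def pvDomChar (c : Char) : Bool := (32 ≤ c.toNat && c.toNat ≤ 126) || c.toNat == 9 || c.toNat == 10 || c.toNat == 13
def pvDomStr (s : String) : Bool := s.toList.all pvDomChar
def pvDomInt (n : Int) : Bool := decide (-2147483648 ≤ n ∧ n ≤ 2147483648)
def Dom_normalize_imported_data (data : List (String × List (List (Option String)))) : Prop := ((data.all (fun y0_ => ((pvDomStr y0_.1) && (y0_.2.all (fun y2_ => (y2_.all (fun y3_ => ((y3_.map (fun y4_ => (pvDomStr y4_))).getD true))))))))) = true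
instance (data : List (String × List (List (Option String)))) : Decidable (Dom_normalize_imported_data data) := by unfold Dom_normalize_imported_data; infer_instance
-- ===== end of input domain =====

-- B drops A's redundant max_cols padding pass (undone by the trailing-None strip), cleans each
-- row in one back-to-front pass, and keeps rows by slicing (first row + later non-empty rows)
-- instead of A's stateful keep-flag; objective: simpler.


-- ===== PORT A =====
-- while normalized_row and normalized_row[-1] is None: normalized_row.pop()
-- (fuel = the list's length bounds the number of pops; it only makes the loop total)
def pvPopGo : Nat → List (Option String) → List (Option String)
  | 0, r => r
  | n + 1, r => if r.getLast? = some none then pvPopGo n r.dropLast else r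

def pvPopA (r : List (Option String)) : List (Option String) :=
  pvPopGo r.length r

def normalize_imported_data (data : List (String × List (List (Option String)))) : List (String × List (List (Option String))) :=
  data.foldl (fun normalized p =>
    let rows := p.2
    -- first pass: find maximum columns
    let max_cols := rows.foldl (fun m row => max m row.length) 0
    -- second pass: normalize rows
    let normalized_rows := rows.foldl (fun nrs row =>
      let nr := (List.range max_cols).foldl (fun acc i =>
          if h : i < row.length then
            acc ++ [if row[i] = some "" then none else row[i]]
          else
            acc ++ [none]) []
      let nr := pvPopA nr
      if nr ≠ [] ∨ nrs = [] then nrs ++ [nr] else nrs) []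
    normalized ++ [(p.1, normalized_rows)]) []

-- ===== PORT B =====
-- one back-to-front pass: map "" to none, skip while the (reversed) prefix is all none
def pvCleanB (row : List (Option String)) : List (Option String) :=
  (row.reverse.foldl (fun out v =>
    let v := if v = some "" then none else v
    if out ≠ [] ∨ v ≠ none then out ++ [v] else out) []).reverse

def normalize_imported_data_alt (data : List (String × List (List (Option String)))) : List (String × List (List (Option String))) :=
  data.foldl (fun normalized p =>
    let cleaned := p.2.map pvCleanB
    normalized ++ [(p.1, cleaned.take 1 ++ (cleaned.drop 1).filter (fun r => r ≠ []))]) []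

-- ===== PRECONDITION & SPEC =====
def Spec_normalize_imported_data (data : List (String × List (List (Option String)))) (out : List (String × List (List (Option String)))) : Prop := out = normalize_imported_data_alt data
instance (data : List (String × List (List (Option String)))) (out : List (String × List (List (Option String)))) : Decidable (Spec_normalize_imported_data data out) := by unfold Spec_normalize_imported_data; infer_instance

-- ===== CLAIM (what is proved, stated in full; the proofs are below) =====
def Claim_equal_normalize_imported_data : Prop := ∀ (data : List (String × List (List (Option String)))), Dom_normalize_imported_data data → Spec_normalize_imported_data data (normalize_imported_data data)

-- ===== LEMMAS AND PROOFS =====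

-- abbreviation used only in proofs: the value transformation "" ↦ None
def pvF (v : Option String) : Option String := if v = some "" then none else v

lemma pvPopGo_reverse (ys : List (Option String)) :
    ∀ n : Nat, ys.length ≤ n →
    pvPopGo n ys.reverse = (ys.dropWhile (fun v => v == none)).reverse := by
  induction ys with
  | nil =>
    intro n _
    cases n with
    | zero => rfl
    | succ n => simp [pvPopGo]
  | cons v t ih =>
    intro n hn
    cases n with
    | zero => simp at hn
    | succ n =>
      rw [pvPopGo]
      simp only [List.reverse_cons, List.getLast?_concat, List.dropLast_concat]
      by_cases hv : v = (none : Option String)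
      · subst hv
        rw [List.dropWhile_cons]
        simpa using ih n (by simpa using hn)
      · rw [List.dropWhile_cons]; simp [hv]

lemma pvPopA_eq (ys : List (Option String)) :
    pvPopA ys = (ys.reverse.dropWhile (fun v => v == none)).reverse := by
  have h := pvPopGo_reverse ys.reverse ys.length (by simp)
  rw [List.reverse_reverse] at h
  exact h

lemma pvPopA_reverse (ys : List (Option String)) :
    pvPopA ys.reverse = (ys.dropWhile (fun v => v == none)).reverse := by
  rw [pvPopA_eq, List.reverse_reverse]

lemma dropWhile_replicate_none (k : Nat) (l : List (Option String)) :
    List.dropWhile (fun v => v == none) (List.replicate k (none : Option String) ++ l) =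
      List.dropWhile (fun v => v == none) l := by
  induction k with
  | zero => simp
  | succ k ih =>
    rw [List.replicate_succ, List.cons_append, List.dropWhile_cons]
    simpa using ih

lemma pvPopA_append_replicate (xs : List (Option String)) (k : Nat) :
    pvPopA (xs ++ List.replicate k none) = pvPopA xs := by
  rw [pvPopA_eq, pvPopA_eq, List.reverse_append, List.reverse_replicate,
    dropWhile_replicate_none]

lemma cleanB_fold_nonempty (t : List (Option String)) :
    ∀ acc : List (Option String), acc ≠ [] →
    t.foldl (fun out v =>
      if out ≠ [] ∨ (if v = some "" then none else v) ≠ none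
      then out ++ [if v = some "" then none else v] else out) acc = acc ++ t.map pvF := by
  induction t with
  | nil => intro acc _; simp
  | cons v t ih =>
    intro acc hacc
    simp only [List.foldl_cons]
    rw [if_pos (Or.inl hacc), ih (acc ++ [if v = some "" then none else v]) (by simp)]
    simp [pvF]

lemma cleanB_fold_nil (l : List (Option String)) :
    l.foldl (fun out v =>
      if out ≠ [] ∨ (if v = some "" then none else v) ≠ none
      then out ++ [if v = some "" then none else v] else out) [] =
    (l.map pvF).dropWhile (fun v => v == none) := by
  induction l with
  | nil => simp
  | cons v t ih =>
    simp only [List.foldl_cons, List.map_cons]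
    by_cases hv : pvF v = none
    · have hv' : (if v = some "" then none else v) = (none : Option String) := hv
      rw [hv', List.dropWhile_cons]
      simpa [hv] using ih
    · rw [if_pos (Or.inr (show (if v = some "" then none else v) ≠ none from hv)),
        cleanB_fold_nonempty t ([] ++ [if v = some "" then none else v]) (by simp),
        List.dropWhile_cons]
      simp [hv]
      rfl

lemma cleanB_eq_pop_map (row : List (Option String)) :
    pvCleanB row = pvPopA (row.map pvF) := by
  have h := pvPopA_reverse ((row.map pvF).reverse)
  rw [List.reverse_reverse] at h
  show (row.reverse.foldl (fun out v =>
      if out ≠ [] ∨ (if v = some "" then none else v) ≠ none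
      then out ++ [if v = some "" then none else v] else out) []).reverse = _
  rw [cleanB_fold_nil, h, ← List.map_reverse]

lemma build_eq_take_replicate (row : List (Option String)) (m : Nat) :
    (List.range m).foldl (fun acc i =>
      if h : i < row.length then
        acc ++ [if row[i] = some "" then none else row[i]]
      else
        acc ++ [none]) [] = (row.map pvF).take m ++ List.replicate (m - row.length) none := by
  induction m with
  | zero => simp
  | succ m ih =>
    rw [List.range_succ, List.foldl_append, ih]
    by_cases h : m < row.length
    · have : m + 1 - row.length = 0 := by omega
      have hm : m - row.length = 0 := by omega
      simp only [List.foldl_cons, List.foldl_nil, dif_pos h, this, hm, List.replicate,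
        List.append_nil]
      rw [List.take_add_one]
      have : (row.map pvF)[m]? = some (pvF row[m]) := by
        rw [List.getElem?_map, List.getElem?_eq_getElem h]; rfl
      simp [this, pvF]
    · have hlen : (row.map pvF).length = row.length := by simp
      have h1 : (row.map pvF).take m = row.map pvF := List.take_of_length_le (by omega)
      have h2 : (row.map pvF).take (m + 1) = row.map pvF := List.take_of_length_le (by omega)
      simp only [List.foldl_cons, List.foldl_nil, dif_neg h, h1, h2]
      rw [List.append_assoc]
      congr 1
      rw [← List.replicate_succ']
      congr 1
      omega

lemma row_clean_eq (row : List (Option String)) (m : Nat) (hm : row.length ≤ m) :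
    pvPopA ((List.range m).foldl (fun acc i =>
      if h : i < row.length then
        acc ++ [if row[i] = some "" then none else row[i]]
      else
        acc ++ [none]) []) = pvCleanB row := by
  rw [build_eq_take_replicate,
    List.take_of_length_le (by simpa using hm),
    pvPopA_append_replicate, cleanB_eq_pop_map]

lemma maxcols_mono (rows : List (List (Option String))) :
    ∀ a : Nat, a ≤ rows.foldl (fun m row => max m row.length) a := by
  induction rows with
  | nil => intro a; simp
  | cons r t ih =>
    intro a
    calc a ≤ max a r.length := le_max_left _ _
    _ ≤ _ := by simpa using ih (max a r.length)

lemma maxcols_ge (rows : List (List (Option String))) (row : List (Option String))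
    (hrow : row ∈ rows) :
    ∀ a : Nat, row.length ≤ rows.foldl (fun m row => max m row.length) a := by
  induction rows with
  | nil => cases hrow
  | cons r t ih =>
    intro a
    rcases List.mem_cons.mp hrow with h | h
    · subst h
      calc row.length ≤ max a row.length := le_max_right _ _
      _ ≤ _ := by simpa using maxcols_mono t (max a row.length)
    · simpa using ih h (max a r.length)

lemma keep_fold_nonempty (g : List (Option String) → List (Option String))
    (t : List (List (Option String))) :
    ∀ acc : List (List (Option String)), acc ≠ [] →
    t.foldl (fun nrs row => if g row ≠ [] ∨ nrs = [] then nrs ++ [g row] else nrs) acc =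
      acc ++ (t.map g).filter (fun r => r ≠ []) := by
  induction t with
  | nil => intro acc _; simp
  | cons r t ih =>
    intro acc hacc
    simp only [List.foldl_cons, List.map_cons, List.filter_cons]
    by_cases hg : g r = []
    · rw [if_neg (by simp [hg, hacc]), ih acc hacc]
      simp [hg]
    · rw [if_pos (Or.inl hg), ih (acc ++ [g r]) (by simp)]
      simp [hg]

lemma keep_fold (g : List (Option String) → List (Option String))
    (rows : List (List (Option String))) :
    rows.foldl (fun nrs row => if g row ≠ [] ∨ nrs = [] then nrs ++ [g row] else nrs) [] =
      (rows.map g).take 1 ++ ((rows.map g).drop 1).filter (fun r => r ≠ []) := by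
  cases rows with
  | nil => simp
  | cons r t =>
    simp only [List.foldl_cons, List.map_cons, List.take_succ_cons, List.take_zero,
      List.drop_succ_cons, List.drop_zero]
    rw [if_pos (Or.inr trivial)]
    simpa using keep_fold_nonempty g t ([] ++ [g r]) (by simp)

lemma sheet_eq (rows : List (List (Option String))) :
    rows.foldl (fun nrs row =>
      if pvPopA ((List.range (rows.foldl (fun m row => max m row.length) 0)).foldl
          (fun acc i =>
            if h : i < row.length then
              acc ++ [if row[i] = some "" then none else row[i]]
            else
              acc ++ [none]) []) ≠ [] ∨ nrs = []
      then nrs ++ [pvPopA ((List.range (rows.foldl (fun m row => max m row.length) 0)).foldl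
          (fun acc i =>
            if h : i < row.length then
              acc ++ [if row[i] = some "" then none else row[i]]
            else
              acc ++ [none]) [])]
      else nrs) [] =
    (rows.map pvCleanB).take 1 ++ ((rows.map pvCleanB).drop 1).filter (fun r => r ≠ []) := by
  rw [← keep_fold pvCleanB rows]
  apply PySem.List.foldl_congr_mem
  intro nrs row hrow
  rw [row_clean_eq row _ (maxcols_ge rows row hrow 0)]

-- ===== VERDICT (by name: the statement is the Claim_ definition above) =====
theorem normalize_imported_data_spec : Claim_equal_normalize_imported_data := by
  intro data hd
  clear hd
  unfold Spec_normalize_imported_data normalize_imported_data normalize_imported_data_alt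
  induction data using List.reverseRecOn with
  | nil => rfl
  | append_singleton t p ih =>
    rw [List.foldl_append, List.foldl_append, ih]
    simp only [List.foldl_cons, List.foldl_nil]
    rw [sheet_eq p.2]
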